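-- pv_equiv track=rewrite | github.com/Stefant17/VerkefniFr-PythonAfanga | python_verkefni_1/verkefni1.py | process_ls
-- ===== SOURCE A (Python) =====
-- def process_ls(n):
--   b = n.split()
--   a = n.splitlines()[0]
--   l = len(a.split())
--   c = []
--   for a in range(l):
--     for i in range(a,len(b),l):
--       c.append(b[i])
--   return c
-- ===== SOURCE B (Python) =====
-- def process_ls(n):
--   b = n.split()
--   l = len(n.splitlines()[0].split())
--   if l == 0:
--     return []
--   buckets = [[] for _ in range(l)]
--   for i, tok in enumerate(b):
--     buckets[i % l].append(tok)
--   out = []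
--   for bucket in buckets:
--     out += bucket
--   return out
-- ===== Notes on version B (the rewrite author's own statement) =====
-- stated objective: alternative
-- what changed: B replaces A's l strided index scans over the token list by one forward enumerate pass that drops each token into bucket i % l, then concatenates the buckets.
import Mathlib
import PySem

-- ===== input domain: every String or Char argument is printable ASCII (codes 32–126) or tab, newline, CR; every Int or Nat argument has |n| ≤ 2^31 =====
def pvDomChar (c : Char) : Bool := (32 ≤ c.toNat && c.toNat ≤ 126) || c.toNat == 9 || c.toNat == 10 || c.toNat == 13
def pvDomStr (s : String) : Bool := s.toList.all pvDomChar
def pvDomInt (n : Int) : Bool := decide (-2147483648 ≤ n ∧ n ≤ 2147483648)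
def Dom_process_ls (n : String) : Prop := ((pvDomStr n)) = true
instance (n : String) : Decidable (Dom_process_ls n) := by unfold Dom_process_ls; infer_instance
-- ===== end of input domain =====

-- B replaces A's l strided index scans by one forward bucket pass (i % l) followed by bucket
-- concatenation — an alternative decomposition of the same column-major transpose.


-- ===== PORT A =====
-- literal port of A: b = n.split(); a = n.splitlines()[0] (IndexError when splitlines is empty,
-- excluded by Pre_; the `none` branch is unreachable under Pre_); then the two nested range loops
def process_ls (n : String) : List String :=
  let b := PySem.Str.split₀ n
  match (PySem.Str.splitlines n).head? with
  | none => []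
  | some a =>
    let l := (PySem.Str.split₀ a).length
    (PySem.List.pyRange 0 (l : Int) 1).foldl
      (fun c a =>
        (PySem.List.pyRange a (b.length : Int) (l : Int)).foldl
          (fun c i => c ++ [PySem.List.pyGetD b i ""]) c) []

-- ===== PORT B =====
-- literal port of B (Source B): same tokenization (its [0] raises on the same inputs, excluded by
-- Pre_), then one enumerate pass appending each token to bucket i % l, then bucket concatenation
def process_ls_alt (n : String) : List String :=
  let b := PySem.Str.split₀ n
  match (PySem.Str.splitlines n).head? with
  | none => []
  | some a =>
    let l := (PySem.Str.split₀ a).length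
    if l = 0 then []
    else
      let buckets :=
        (PySem.List.enumerate b).foldl
          (fun bk p =>
            PySem.List.pySetD bk (PySem.Int.mod p.1 (l : Int))
              (PySem.List.pyGetD bk (PySem.Int.mod p.1 (l : Int)) [] ++ [p.2]))
          ((List.range l).map (fun _ => ([] : List String)))
      buckets.foldl (fun out bucket => out ++ bucket) []

-- ===== PRECONDITION & SPEC =====
-- Pre_ excludes exactly the inputs where n.splitlines() is empty (only n = ""), on which both the
-- Python A and the Python B raise IndexError at splitlines()[0].
def Pre_process_ls (n : String) : Prop := PySem.Str.splitlines n ≠ []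
instance (n : String) : Decidable (Pre_process_ls n) := by unfold Pre_process_ls; infer_instance
def pvWitness_process_ls : String := "a b c\nd e f"

def Spec_process_ls (n : String) (out : List String) : Prop := out = process_ls_alt n
instance (n : String) (out : List String) : Decidable (Spec_process_ls n out) := by unfold Spec_process_ls; infer_instance

-- ===== CLAIM (what is proved, stated in full; the proofs are below) =====
def Claim_equal_process_ls : Prop := ∀ (n : String), Dom_process_ls n → Pre_process_ls n → Spec_process_ls n (process_ls n)

-- ===== LEMMAS AND PROOFS =====

theorem pyRange_step_eq_filter_range (a l n : Nat) (ha : a < l) :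
    PySem.List.pyRange (a : Int) (n : Int) (l : Int)
      = ((List.range n).filter (fun i => i % l == a)).map (fun i : Nat => (i : Int)) := by
  have hl : (0 : Int) < (l : Int) := by exact_mod_cast Nat.pos_of_ne_zero (by omega)
  have p1 : (PySem.List.pyRange (a : Int) (n : Int) (l : Int)).Pairwise (· < ·) := by
    rw [PySem.List.pyRange_of_pos _ _ hl]
    refine (List.pairwise_lt_range).map _ (fun x y h => ?_)
    have h' : (x : Int) < y := by exact_mod_cast h
    nlinarith
  have p2 : (((List.range n).filter (fun i => i % l == a)).map (fun i : Nat => (i : Int))).Pairwise ((· < ·) : Int → Int → Prop) :=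
    ((List.pairwise_lt_range).filter _).map _ (fun x y h => by exact_mod_cast h)
  apply List.Perm.eq_of_pairwise (fun x y _ _ h1 h2 => absurd h2 (lt_asymm h1)) p1 p2
  rw [List.perm_ext_iff_of_nodup p1.nodup p2.nodup]
  intro x
  rw [PySem.List.mem_pyRange_iff_of_pos hl]
  simp only [List.mem_map, List.mem_filter, List.mem_range, beq_iff_eq]
  constructor
  · rintro ⟨h1, h2, k, hk⟩
    have hx0 : 0 ≤ x := le_trans (by positivity) h1
    have hkn : 0 ≤ k := by nlinarith
    have hx : x = ↑a + (l : Int) * (↑k.toNat : Int) := by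
      rw [Int.toNat_of_nonneg hkn]; linarith
    have hxn : x.toNat = a + l * k.toNat := by
      have : (x.toNat : Int) = ((a + l * k.toNat : Nat) : Int) := by
        push_cast; rw [Int.toNat_of_nonneg hx0]; linarith
      exact_mod_cast this
    refine ⟨x.toNat, ⟨by omega, ?_⟩, by omega⟩
    rw [hxn, Nat.add_mul_mod_self_left, Nat.mod_eq_of_lt ha]
  · rintro ⟨i, ⟨hin, him⟩, rfl⟩
    have hi : i = l * (i / l) + a := by
      conv_lhs => rw [← Nat.div_add_mod i l]; rw [him]
    refine ⟨by exact_mod_cast (him ▸ Nat.mod_le i l), by exact_mod_cast hin, ⟨(i / l : Nat), ?_⟩⟩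
    have h2 : (i : Int) = ↑l * ↑(i / l) + ↑a := by exact_mod_cast hi
    linarith

def bucketAdd (l a : Nat) (xs : List String) (s : Int) : List String :=
  ((PySem.List.enumerate xs s).filter
    (fun p => (PySem.Int.mod p.1 (l : Int)).toNat == a)).map (fun p => p.2)

theorem bucketAdd_eq (l a : Nat) (hl : 0 < l) (xs : List String) : ∀ (s : Nat),
    bucketAdd l a xs (s : Int)
      = (((List.range xs.length).map (fun k => s + k)).filter (fun i => i % l == a)).map
          (fun i => xs.getD (i - s) "") := by
  induction xs with
  | nil => intro s; simp [bucketAdd]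
  | cons x t ih =>
    intro s
    have hl' : (0 : Int) < (l : Int) := by exact_mod_cast hl
    have hmod : (PySem.Int.mod (s : Int) (l : Int)).toNat = s % l := by
      rw [PySem.Int.mod_eq_emod_of_pos hl']; omega
    have htail := ih (s + 1)
    have hs1 : (((s + 1 : Nat)) : Int) = (s : Int) + 1 := by push_cast; ring
    rw [hs1] at htail
    have hstep : (((List.range t.length).map (fun k => s + 1 + k)).filter
          (fun i => i % l == a)).map (fun i => (x :: t).getD (i - s) "")
        = (((List.range t.length).map (fun k => s + 1 + k)).filter
          (fun i => i % l == a)).map (fun i => t.getD (i - (s + 1)) "") := by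
      apply List.map_congr_left
      intro i hi
      simp only [List.mem_filter, List.mem_map, List.mem_range] at hi
      obtain ⟨⟨k, _, rfl⟩, _⟩ := hi
      have e1 : s + 1 + k - s = k + 1 := by omega
      have e2 : s + 1 + k - (s + 1) = k := by omega
      rw [e1, e2, List.getD_cons_succ]
    have hmapf : (List.range (x :: t).length).map (fun k => s + k)
        = s :: (List.range t.length).map (fun k => s + 1 + k) := by
      simp only [List.length_cons, List.range_succ_eq_map, List.map_cons, Nat.add_zero,
        List.map_map]
      congr 1
      apply List.map_congr_left
      intro k _
      simp [Function.comp]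
      omega
    rw [hmapf]
    simp only [bucketAdd, PySem.List.enumerate_cons, List.filter_cons, hmod]
    by_cases hsa : s % l = a
    · simp only [hsa, beq_self_eq_true, if_true, List.map_cons, Nat.sub_self,
        List.getD_cons_zero]
      rw [hstep, ← htail]
      rfl
    · have hb : (s % l == a) = false := by simp [hsa]
      simp only [hb, Bool.false_eq_true, if_false]
      rw [hstep, ← htail]
      rfl

theorem map_getD_range_eq (B : List (List String)) :
    (List.range B.length).map (fun a => B.getD a []) = B := by
  apply List.ext_getElem
  · simp
  · intro i h1 h2
    simp [List.getElem?_eq_getElem h2]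

theorem bfold_eq (l : Nat) (hl : 0 < l) (xs : List String) : ∀ (s : Int) (B : List (List String)),
    B.length = l →
    (PySem.List.enumerate xs s).foldl
        (fun bk p =>
          PySem.List.pySetD bk (PySem.Int.mod p.1 (l : Int))
            (PySem.List.pyGetD bk (PySem.Int.mod p.1 (l : Int)) [] ++ [p.2])) B
      = (List.range l).map (fun a => B.getD a [] ++ bucketAdd l a xs s) := by
  induction xs with
  | nil =>
    intro s B hB
    simp only [PySem.List.enumerate, List.foldl_nil, bucketAdd, List.filter_nil, List.map_nil,
      List.append_nil]
    rw [← hB, map_getD_range_eq]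
  | cons x t ih =>
    intro s B hB
    have hl' : (0 : Int) < (l : Int) := by exact_mod_cast hl
    have hm0 : 0 ≤ PySem.Int.mod s (l : Int) := PySem.Int.mod_nonneg s hl'
    have hmlt : (PySem.Int.mod s (l : Int)).toNat < B.length := by
      have := PySem.Int.mod_lt s hl'
      omega
    set m := (PySem.Int.mod s (l : Int)).toNat with hm
    have hset : PySem.List.pySetD B (PySem.Int.mod s (l : Int))
          (PySem.List.pyGetD B (PySem.Int.mod s (l : Int)) [] ++ [x])
        = B.set m (B.getD m [] ++ [x]) := by
      rw [PySem.List.pySetD_of_nonneg _ _ hm0,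
        PySem.List.pyGetD_eq_getElem B [] hm0 (by omega),
        List.getD_eq_getElem B [] hmlt]
    have hB' : (B.set m (B.getD m [] ++ [x])).length = l := by simp [hB]
    rw [PySem.List.enumerate_cons, List.foldl_cons, hset, ih (s + 1) _ hB']
    apply List.map_congr_left
    intro a hal
    rw [List.mem_range] at hal
    have hbk : bucketAdd l a (x :: t) s
        = (if m == a then [x] else []) ++ bucketAdd l a t (s + 1) := by
      simp only [bucketAdd, PySem.List.enumerate_cons, List.filter_cons, ← hm]
      by_cases h : m = a
      · simp [h]
      · simp [h]
    have hgd : (B.set m (B.getD m [] ++ [x])).getD a []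
        = if m = a then B.getD m [] ++ [x] else B.getD a [] := by
      simp only [List.getD, List.getElem?_set, hmlt, if_true]
      by_cases h : m = a
      · simp [h]
      · simp [h]
    rw [hbk, hgd]
    by_cases h : m = a
    · simp [h, List.append_assoc]
    · simp [h]

theorem core_eq (b : List String) (l : Nat) :
    (PySem.List.pyRange 0 (l : Int) 1).foldl
        (fun c a =>
          (PySem.List.pyRange a (b.length : Int) (l : Int)).foldl
            (fun c i => c ++ [PySem.List.pyGetD b i ""]) c) []
      = (if l = 0 then [] else
          ((PySem.List.enumerate b).foldl
            (fun bk p =>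
              PySem.List.pySetD bk (PySem.Int.mod p.1 (l : Int))
                (PySem.List.pyGetD bk (PySem.Int.mod p.1 (l : Int)) [] ++ [p.2]))
            ((List.range l).map (fun _ => ([] : List String)))).foldl
            (fun out bucket => out ++ bucket) []) := by
  by_cases hl0 : l = 0
  · subst hl0
    simp [PySem.List.pyRange_one_eq_nil (by omega : (0:Int) ≤ 0)]
  · have hl : 0 < l := Nat.pos_of_ne_zero hl0
    rw [if_neg hl0]
    have hB0 : ((List.range l).map (fun _ => ([] : List String))).length = l := by simp
    rw [bfold_eq l hl b 0 _ hB0]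
    have hgd0 : ∀ a : Nat, ((List.range l).map (fun _ => ([] : List String))).getD a [] = [] := by
      intro a
      simp only [List.getD, List.getElem?_map]
      cases (List.range l)[a]? <;> simp
    have hbuckets : (List.range l).map
          (fun a => ((List.range l).map (fun _ => ([] : List String))).getD a [] ++ bucketAdd l a b 0)
        = (List.range l).map (fun a => bucketAdd l a b 0) := by
      apply List.map_congr_left
      intro a _
      rw [hgd0 a, List.nil_append]
    rw [hbuckets]
    have hflat : ∀ L : List (List String), L.foldl (fun out bucket => out ++ bucket) [] = L.flatten := by
      intro L
      have := PySem.List.foldl_append_eq_flatMap (id : List String → List String) L []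
      simpa using this
    rw [hflat]
    simp only [PySem.List.foldl_append_singleton_eq_map, PySem.List.foldl_append_eq_flatMap,
      List.nil_append]
    rw [PySem.List.pyRange_zero_nat l, List.flatMap_map]
    rw [List.flatMap_def]
    congr 1
    apply List.map_congr_left
    intro a ha
    rw [List.mem_range] at ha
    have hba := bucketAdd_eq l a hl b 0
    simp only [Nat.cast_zero, Nat.zero_add, Nat.sub_zero] at hba
    rw [pyRange_step_eq_filter_range a l b.length ha, List.map_map, hba]
    simp [Function.comp]

-- ===== VERDICT (by name: the statement is the Claim_ definition above) =====
theorem process_ls_spec : Claim_equal_process_ls := by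
  intro n _ hpre
  unfold Spec_process_ls
  cases h : (PySem.Str.splitlines n).head? with
  | none => exact absurd (List.head?_eq_none_iff.mp h) hpre
  | some a =>
    simp only [process_ls, process_ls_alt, h]
    exact core_eq (PySem.Str.split₀ n) (PySem.Str.split₀ a).length
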